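-- pv_equiv track=rewrite | github.com/onekenoby/doclassExt | preprocess/text_processor.py | _fix_hyphenation
-- ===== SOURCE A (Python) =====
-- from typing import List
--
-- def _fix_hyphenation(lines: List[str]) -> List[str]:
--     """Join lines that were hyphen-broken across PDF line wraps."""
--     out: list[str] = []
--     buf = ""
--     for ln in lines:
--         if ln.endswith("-") and not ln.endswith("--"):
--             buf += ln[:-1]        # drop hyphen
--         else:
--             out.append(buf + ln)
--             buf = ""
--     if buf:
--         out.append(buf)
--     return out
-- ===== SOURCE B (Python) =====
-- from typing import List
--
-- def _fix_hyphenation(lines: List[str]) -> List[str]: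
--     """Join lines that were hyphen-broken across PDF line wraps."""
--     out: list[str] = []
--     i, n = 0, len(lines)
--     while i < n:
--         frags: list[str] = []
--         while i < n and lines[i].endswith("-") and not lines[i].endswith("--"):
--             frags.append(lines[i][:-1])
--             i += 1
--         if i < n:
--             out.append("".join(frags) + lines[i])
--             i += 1
--         else:
--             tail = "".join(frags)
--             if tail:
--                 out.append(tail)
--     return out
-- ===== Notes on version B (the rewrite author's own statement) =====
-- stated objective: alternative
-- what changed: A's single flat pass with a string buffer and reset becomes a run-collecting scan: an explicit index with an inner while that gathers each hyphen-broken run into a fragment list and emits it joined in one step.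
import Mathlib
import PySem

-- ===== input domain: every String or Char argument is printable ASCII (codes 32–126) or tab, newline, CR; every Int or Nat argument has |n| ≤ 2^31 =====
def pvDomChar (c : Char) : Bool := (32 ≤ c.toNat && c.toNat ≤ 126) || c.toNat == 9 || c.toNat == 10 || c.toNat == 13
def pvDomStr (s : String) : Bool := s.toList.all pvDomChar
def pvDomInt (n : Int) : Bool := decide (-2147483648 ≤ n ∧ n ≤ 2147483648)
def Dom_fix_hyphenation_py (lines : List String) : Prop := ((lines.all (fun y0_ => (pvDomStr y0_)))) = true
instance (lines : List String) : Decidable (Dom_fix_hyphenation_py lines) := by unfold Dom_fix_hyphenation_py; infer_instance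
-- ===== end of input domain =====

-- B restructures A's flat buffer-accumulating pass into a run-collecting scan (nested loop with a fragment list); objective: alternative decomposition, same cost.


-- ===== PORT A =====
def fix_hyphenation_py (lines : List String) : List String :=
  let st := lines.foldl (fun (st : List String × String) ln =>
    if PySem.Str.endswith ln "-" && !(PySem.Str.endswith ln "--") then
      (st.1, st.2 ++ PySem.Str.slice ln none (some (-1)))
    else
      (st.1 ++ [st.2 ++ ln], "")) ([], "")
  if st.2 = "" then st.1 else st.1 ++ [st.2]

-- ===== PORT B =====
-- outer while over the remaining lines, inner run collected into a fragment list
def fixHyphAltGo (frags : List String) : List String → List String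
  | [] =>
      let tail := PySem.Str.join "" frags
      if tail = "" then [] else [tail]
  | ln :: rest =>
      if PySem.Str.endswith ln "-" && !(PySem.Str.endswith ln "--") then
        fixHyphAltGo (frags ++ [PySem.Str.slice ln none (some (-1))]) rest
      else
        (PySem.Str.join "" frags ++ ln) :: fixHyphAltGo [] rest

def fix_hyphenation_py_alt (lines : List String) : List String := fixHyphAltGo [] lines

-- ===== PRECONDITION & SPEC =====
def Spec_fix_hyphenation_py (lines : List String) (out : List String) : Prop := out = fix_hyphenation_py_alt lines
instance (lines : List String) (out : List String) : Decidable (Spec_fix_hyphenation_py lines out) := by unfold Spec_fix_hyphenation_py; infer_instance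

-- ===== CLAIM (what is proved, stated in full; the proofs are below) =====
def Claim_equal_fix_hyphenation_py : Prop := ∀ (lines : List String), Dom_fix_hyphenation_py lines → Spec_fix_hyphenation_py lines (fix_hyphenation_py lines)

-- ===== LEMMAS AND PROOFS =====

theorem join_empty_append (fs : List String) (x : String) :
    PySem.Str.join "" (fs ++ [x]) = PySem.Str.join "" fs ++ x := by
  have hc : ∀ (l : List (List Char)) (y : List Char),
      PySem.Chars.join [] (l ++ [y]) = PySem.Chars.join [] l ++ y := by
    intro l y
    induction l with
    | nil => simp [PySem.Chars.join_nil, PySem.Chars.join_singleton]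
    | cons a l ih =>
        cases l with
        | nil => simp [PySem.Chars.join_singleton, PySem.Chars.join_cons_cons]
        | cons b l => simp [PySem.Chars.join_cons_cons] at ih ⊢; simp [ih]
  apply String.toList_inj.mp
  simp [PySem.Str.toList_join, String.toList_append, hc]

theorem fixHyph_loop (rest : List String) (out : List String) (frags : List String) :
    (let st := rest.foldl (fun (st : List String × String) ln =>
        if PySem.Str.endswith ln "-" && !(PySem.Str.endswith ln "--") then
          (st.1, st.2 ++ PySem.Str.slice ln none (some (-1)))
        else
          (st.1 ++ [st.2 ++ ln], "")) (out, PySem.Str.join "" frags)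
      if st.2 = "" then st.1 else st.1 ++ [st.2]) = out ++ fixHyphAltGo frags rest := by
  induction rest generalizing out frags with
  | nil =>
      simp only [List.foldl_nil, fixHyphAltGo]
      split_ifs <;> simp
  | cons ln rest ih =>
      simp only [List.foldl_cons, fixHyphAltGo]
      by_cases h : (PySem.Str.endswith ln "-" && !(PySem.Str.endswith ln "--")) = true
      · simp only [h, if_pos]
        rw [← join_empty_append]
        exact ih out (frags ++ [PySem.Str.slice ln none (some (-1))])
      · rw [Bool.not_eq_true] at h
        simp only [h, Bool.false_eq_true, if_false]
        have hj : PySem.Str.join "" ([] : List String) = "" := rfl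
        have hih := ih (out ++ [PySem.Str.join "" frags ++ ln]) []
        rw [hj] at hih
        rw [hih]
        simp

-- ===== VERDICT (by name: the statement is the Claim_ definition above) =====
theorem fix_hyphenation_py_spec : Claim_equal_fix_hyphenation_py := by
  intro lines _
  unfold Spec_fix_hyphenation_py fix_hyphenation_py fix_hyphenation_py_alt
  have := fixHyph_loop lines [] []
  simpa using this
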